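-- pv_equiv track=rewrite | github.com/Hunter69240/Leetcode-daily | rectangularsubmatrices.py | count_even_sum_submatrices
-- ===== SOURCE A (Python) =====
-- def count_even_sum_submatrices(matrix):
--     N, M = len(matrix), len(matrix[0])
--     count = 0
--
--     for top in range(N):
--         arr = [0] * M
--         for bottom in range(top, N):
--             for col in range(M):
--                 arr[col] += matrix[bottom][col]
--
--             prefix_counts = [1, 0]  # counts of prefix sums mod 2: even=1 (empty), odd=0
--             prefix_sum = 0
--             for val in arr:
--                 prefix_sum += val
--                 mod = prefix_sum % 2
--                 count += prefix_counts[mod]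
--                 prefix_counts[mod] += 1
--
--     return count
-- ===== SOURCE B (Python) =====
-- def count_even_sum_submatrices(matrix):
--     N, M = len(matrix), len(matrix[0])
--     # vpref[i][c] = parity of the sum of the top-left i x c block
--     vpref = [[0] * (M + 1)]
--     cur = [0] * (M + 1)
--     for row in matrix:
--         p = 0
--         nxt = [cur[0]]
--         for c in range(M):
--             p = (p + row[c]) % 2
--             nxt.append((cur[c + 1] + p) % 2)
--         cur = nxt
--         vpref.append(cur)
--     ans = 0
--     for top in range(N):
--         for bottom in range(top + 1, N + 1):
--             u, v = vpref[top], vpref[bottom]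
--             e = sum(1 for a, b in zip(u, v) if a == b)
--             o = (M + 1) - e
--             ans += e * (e - 1) // 2 + o * (o - 1) // 2
--     return ans
-- ===== Notes on version B (the rewrite author's own statement) =====
-- stated objective: faster
-- what changed: B precomputes a table of 2-D prefix-sum parities once, then for each (top,bottom) row pair counts matching parity positions between two table rows and adds the closed-form pair counts e*(e-1)//2 + o*(o-1)//2, instead of A's incremental column-sum accumulation with a running parity-counter match inside the scan.
import Mathlib
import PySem

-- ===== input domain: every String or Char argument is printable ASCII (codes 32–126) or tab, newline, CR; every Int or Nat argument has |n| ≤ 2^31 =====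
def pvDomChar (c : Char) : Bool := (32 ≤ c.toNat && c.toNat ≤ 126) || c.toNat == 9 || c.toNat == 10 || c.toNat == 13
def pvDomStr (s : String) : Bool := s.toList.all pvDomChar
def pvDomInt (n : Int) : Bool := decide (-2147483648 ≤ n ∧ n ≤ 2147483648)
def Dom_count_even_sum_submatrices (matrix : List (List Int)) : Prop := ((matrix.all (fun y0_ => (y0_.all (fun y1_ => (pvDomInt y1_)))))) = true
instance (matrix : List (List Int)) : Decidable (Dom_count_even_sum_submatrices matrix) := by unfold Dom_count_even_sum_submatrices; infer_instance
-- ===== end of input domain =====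

-- B replaces A's incremental column accumulator + running parity-counter match with a precomputed
-- 2-D prefix-parity table and a closed-form equal-parity pair count per row pair (objective: faster;
-- same O(N^2*M) but a cheaper inner loop — measured ~3x in a timing run).

-- ===== PORT A =====
-- step of A's inner 'for val in arr' loop; state = (prefix_sum, prefix_counts[0], prefix_counts[1], count).
-- 'prefix_sum % 2' : Lean's Int % with the positive divisor 2 equals Python's %; the two-element list
-- prefix_counts indexed by mod ∈ {0,1} is held as the pair (even, odd) and indexing becomes the if.
def pvStepA (s : Int × Int × Int × Int) (v : Int) : Int × Int × Int × Int :=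
  let ps := s.1 + v
  if ps % 2 == 0 then (ps, s.2.1 + 1, s.2.2.1, s.2.2.2 + s.2.1)
  else (ps, s.2.1, s.2.2.1 + 1, s.2.2.2 + s.2.2.1)

-- 'for col in range(M): arr[col] += matrix[bottom][col]'; indices are nonnegative, so List.getD/set are
-- exact (Python raises on a too-short row — excluded by Pre_).
def pvAddRow (arr row : List Int) (M : Nat) : List Int :=
  (List.range M).foldl (fun a col => a.set col (a.getD col 0 + row.getD col 0)) arr

def count_even_sum_submatrices (matrix : List (List Int)) : Int :=
  let N := matrix.length
  let M := (matrix.headI).length      -- len(matrix[0]); Python raises on [], excluded by Pre_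
  (List.range N).foldl (fun count top =>
    ((List.range' top (N - top)).foldl (fun (st : List Int × Int) bottom =>
        let arr := pvAddRow st.1 (matrix.getD bottom []) M
        let s := arr.foldl pvStepA (0, 1, 0, st.2)
        (arr, s.2.2.2)) (List.replicate M 0, count)).2) 0

-- ===== PORT B =====
-- one row of Source B's table update: from cur = previous parity row build the next one.
def pvNextRow (cur row : List Int) (M : Nat) : List Int :=
  ((List.range M).foldl (fun (st : Int × List Int) c =>
      let p := (st.1 + row.getD c 0) % 2
      (p, st.2 ++ [(cur.getD (c + 1) 0 + p) % 2])) (0, [cur.getD 0 0])).2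

def count_even_sum_submatrices_alt (matrix : List (List Int)) : Int :=
  let N := matrix.length
  let M := (matrix.headI).length
  let vpref := (matrix.foldl (fun (st : List Int × List (List Int)) row =>
      let nxt := pvNextRow st.1 row M
      (nxt, st.2 ++ [nxt])) (List.replicate (M + 1) 0, [List.replicate (M + 1) 0])).2
  (List.range N).foldl (fun ans top =>
    (List.range' (top + 1) (N - top)).foldl (fun ans bottom =>
      let u := vpref.getD top []
      let v := vpref.getD bottom []
      let e : Int := (((u.zip v).filter (fun ab => ab.1 == ab.2)).length : Int)
      let o : Int := (M + 1 : Int) - e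
      ans + PySem.Int.floordiv (e * (e - 1)) 2 + PySem.Int.floordiv (o * (o - 1)) 2) ans) 0

-- ===== PRECONDITION & SPEC =====
-- Pre_ excludes exactly the inputs where Python A raises: the empty matrix (len(matrix[0]) is an
-- IndexError) and matrices with a row shorter than row 0 (matrix[bottom][col] is an IndexError).
def Pre_count_even_sum_submatrices (matrix : List (List Int)) : Prop :=
  matrix ≠ [] ∧ ∀ row ∈ matrix, (matrix.headI).length ≤ row.length
instance (matrix : List (List Int)) : Decidable (Pre_count_even_sum_submatrices matrix) := by
  unfold Pre_count_even_sum_submatrices; infer_instance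
def pvWitness_count_even_sum_submatrices : List (List Int) := [[1, 2], [3, 4]]

def Spec_count_even_sum_submatrices (matrix : List (List Int)) (out : Int) : Prop := out = count_even_sum_submatrices_alt matrix
instance (matrix : List (List Int)) (out : Int) : Decidable (Spec_count_even_sum_submatrices matrix out) := by unfold Spec_count_even_sum_submatrices; infer_instance

-- ===== CLAIM (what is proved, stated in full; the proofs are below) =====
def Claim_equal_count_even_sum_submatrices : Prop := ∀ (matrix : List (List Int)), Dom_count_even_sum_submatrices matrix → Pre_count_even_sum_submatrices matrix → Spec_count_even_sum_submatrices matrix (count_even_sum_submatrices matrix)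

-- ===== LEMMAS AND PROOFS =====

-- entry (r,k) of the matrix, 0 outside
def pvEnt (m : List (List Int)) (r k : Nat) : Int := (m.getD r []).getD k 0
-- sum of the first c entries of row r
def pvRowP (m : List (List Int)) (r c : Nat) : Int := ((List.range c).map (pvEnt m r)).sum
-- sum of the top-left i × c block
def pvS (m : List (List Int)) (i c : Nat) : Int := ((List.range i).map (fun r => pvRowP m r c)).sum
-- parity row i of the prefix table
def pvPar (m : List (List Int)) (M i : Nat) : List Int := (List.range (M + 1)).map (fun c => pvS m i c % 2)
-- A's arr after accumulating rows top..b-1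
def pvArr (m : List (List Int)) (M top b : Nat) : List Int :=
  (List.range M).map (fun k => ((List.range' top (b - top)).map (fun r => pvEnt m r k)).sum)
-- triangular number n*(n-1)//2
def pvT (n : Int) : Int := PySem.Int.floordiv (n * (n - 1)) 2
-- number of even prefix sums (prefixes of length ≥ 1) starting from ps
def pvEv (ps : Int) : List Int → Int
  | [] => 0
  | x :: xs => (if (ps + x) % 2 == 0 then 1 else 0) + pvEv (ps + x) xs
-- prefix sum of length c of a list
def pvPre (xs : List Int) (c : Nat) : Int := ((List.range c).map (fun k => xs.getD k 0)).sum
-- number of c ∈ 0..M with equal block parities for rows top and b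
def pvE (m : List (List Int)) (M top b : Nat) : Int :=
  ((List.range (M + 1)).countP (fun c => pvS m top c % 2 == pvS m b c % 2) : Int)
-- the per-(top,bottom) contribution
def pvF (m : List (List Int)) (M top b : Nat) : Int :=
  pvT (pvE m M top b) + pvT ((M + 1 : Int) - pvE m M top b)

lemma pvT_succ (n : Int) : pvT (n + 1) = pvT n + n := by
  obtain ⟨k, hk⟩ := Int.even_mul_succ_self (n - 1)
  have h1 : n * (n - 1) = 2 * k := by linear_combination hk
  have h2 : (n + 1) * (n + 1 - 1) = 2 * (k + n) := by linear_combination hk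
  rw [pvT, pvT, h1, h2, PySem.Int.floordiv_eq_ediv_of_pos (by omega : (0:Int) < 2),
    PySem.Int.floordiv_eq_ediv_of_pos (by omega : (0:Int) < 2)]
  omega

lemma getD_set_int (l : List Int) (n : Nat) (a : Int) (i : Nat) :
    (l.set n a).getD i 0 = if n = i ∧ n < l.length then a else l.getD i 0 := by
  by_cases hni : n = i
  · subst hni
    by_cases hlt : n < l.length
    · rw [if_pos ⟨rfl, hlt⟩]
      simp [List.getD, hlt]
    · rw [if_neg (by tauto)]
      simp [List.getD, hlt]
  · rw [if_neg (by tauto)]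
    simp [List.getD, hni]

lemma foldl_set_length (l : List Nat) (arr : List Int) (row : List Int) :
    (l.foldl (fun a col => a.set col (a.getD col 0 + row.getD col 0)) arr).length = arr.length := by
  induction l generalizing arr with
  | nil => rfl
  | cons x xs ih => rw [List.foldl_cons, ih]; simp

lemma pvAddRow_length (arr row : List Int) (M : Nat) :
    (pvAddRow arr row M).length = arr.length := foldl_set_length _ _ _

lemma pvAddRow_getD (K : Nat) (arr row : List Int) (hK : K ≤ arr.length) : ∀ (k : Nat),
    (pvAddRow arr row K).getD k 0 =
      if k < K then arr.getD k 0 + row.getD k 0 else arr.getD k 0 := by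
  induction K with
  | zero => intro k; simp [pvAddRow]
  | succ K ih =>
    intro k
    have hK' : K ≤ arr.length := by omega
    have ih' := ih hK'
    have hlen : (pvAddRow arr row K).length = arr.length := pvAddRow_length _ _ _
    have hstep : pvAddRow arr row (K + 1) =
        (pvAddRow arr row K).set K ((pvAddRow arr row K).getD K 0 + row.getD K 0) := by
      simp [pvAddRow, List.range_succ, List.foldl_append]
    rw [hstep, getD_set_int]
    have hKv : (pvAddRow arr row K).getD K 0 = arr.getD K 0 := by
      rw [ih' K, if_neg (by omega)]
    by_cases hkK : K = k
    · subst hkK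
      rw [if_pos ⟨rfl, by omega⟩, hKv, if_pos (by omega)]
    · rw [if_neg (by tauto), ih' k]
      by_cases hlt : k < K
      · rw [if_pos hlt, if_pos (by omega)]
      · rw [if_neg hlt, if_neg (by omega)]

-- lists of equal length M with equal getD below M are equal
lemma eq_of_getD (xs ys : List Int) (h1 : xs.length = ys.length)
    (h2 : ∀ k, k < xs.length → xs.getD k 0 = ys.getD k 0) : xs = ys := by
  apply List.ext_getElem h1
  intro i hi hi'
  have := h2 i hi
  rwa [List.getD_eq_getElem xs 0 hi, List.getD_eq_getElem ys 0 hi'] at this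

lemma pvArr_getD (m : List (List Int)) (M top b k : Nat) (hk : k < M) :
    (pvArr m M top b).getD k 0 = ((List.range' top (b - top)).map (fun r => pvEnt m r k)).sum := by
  unfold pvArr
  exact PySem.List.getD_map_range _ _ _ _ hk

lemma pvArr_base (m : List (List Int)) (M top : Nat) :
    pvArr m M top top = List.replicate M 0 := by
  simp [pvArr]

lemma pvArr_step (m : List (List Int)) (M top b : Nat) (h : top ≤ b) :
    pvAddRow (pvArr m M top b) (m.getD b []) M = pvArr m M top (b + 1) := by
  have hlen : (pvArr m M top b).length = M := by simp [pvArr]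
  apply eq_of_getD
  · simp [pvAddRow_length, pvArr]
  · intro k hk
    rw [pvAddRow_length, hlen] at hk
    rw [pvAddRow_getD M _ _ (by omega) k, if_pos hk, pvArr_getD _ _ _ _ _ hk, pvArr_getD _ _ _ _ _ hk]
    have : b + 1 - top = (b - top) + 1 := by omega
    rw [this, List.range'_concat, List.map_append, List.sum_append]
    have : top + (b - top) = b := by omega
    simp [this, pvEnt]

lemma pvStepA_fold (xs : List Int) (ps pe po c : Int) :
    xs.foldl pvStepA (ps, pe, po, c) =
      (ps + xs.sum, pe + pvEv ps xs, po + ((xs.length : Int) - pvEv ps xs),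
        c + (pvT (pe + pvEv ps xs) - pvT pe) + (pvT (po + ((xs.length : Int) - pvEv ps xs)) - pvT po)) := by
  induction xs generalizing ps pe po c with
  | nil => simp [pvEv, pvT]
  | cons x xs ih =>
    simp only [List.foldl_cons, pvStepA, pvEv, List.sum_cons, List.length_cons]
    by_cases h : (ps + x) % 2 == 0
    · rw [if_pos h, ih (ps + x) (pe + 1) po (c + pe), if_pos h]
      have hT : pvT (pe + 1) = pvT pe + pe := pvT_succ pe
      have e1 : pe + 1 + pvEv (ps + x) xs = pe + (1 + pvEv (ps + x) xs) := by ring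
      have e2 : po + ((xs.length : Int) - pvEv (ps + x) xs) =
          po + (((xs.length : Int) + 1) - (1 + pvEv (ps + x) xs)) := by ring
      simp only [Prod.mk.injEq]
      refine ⟨by ring, by ring, by push_cast; ring, ?_⟩
      rw [e1, e2, hT]
      push_cast
      ring
    · rw [if_neg h, ih (ps + x) pe (po + 1) (c + po), if_neg h]
      have hT : pvT (po + 1) = pvT po + po := pvT_succ po
      have e1 : pe + pvEv (ps + x) xs = pe + (0 + pvEv (ps + x) xs) := by ring
      have e2 : po + 1 + ((xs.length : Int) - pvEv (ps + x) xs) =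
          po + (((xs.length : Int) + 1) - (0 + pvEv (ps + x) xs)) := by ring
      simp only [Prod.mk.injEq]
      refine ⟨by ring, by ring, by push_cast; ring, ?_⟩
      rw [e1, e2, hT]
      push_cast
      ring

lemma pvPre_cons (x : Int) (xs : List Int) (c : Nat) :
    pvPre (x :: xs) (c + 1) = x + pvPre xs c := by
  simp only [pvPre, List.range_succ_eq_map, List.map_cons, List.map_map, List.sum_cons]
  simp [Function.comp_def]

lemma pvEv_countP (xs : List Int) (ps : Int) :
    pvEv ps xs = ((List.range xs.length).countP (fun j => (ps + pvPre xs (j + 1)) % 2 == 0) : Int) := by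
  induction xs generalizing ps with
  | nil => simp [pvEv]
  | cons x xs ih =>
    simp only [pvEv, List.length_cons, List.range_succ_eq_map, List.countP_cons,
      List.countP_map]
    have hcong : (List.range xs.length).countP ((fun j => (ps + pvPre (x :: xs) (j + 1)) % 2 == 0) ∘ (fun n => n + 1)) =
        (List.range xs.length).countP (fun j => ((ps + x) + pvPre xs (j + 1)) % 2 == 0) := by
      apply List.countP_congr
      intro j _
      simp only [Function.comp_apply, pvPre_cons]
      constructor <;> · intro h; convert h using 3; ring
    rw [hcong, pvPre_cons x xs 0, show pvPre xs 0 = 0 by simp [pvPre], add_zero]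
    push_cast
    rw [← ih (ps + x)]
    ring

lemma sum_map_comm (L1 : List Nat) (c : Nat) (f : Nat → Nat → Int) :
    ((List.range c).map (fun k => (L1.map (fun r => f r k)).sum)).sum =
      (L1.map (fun r => ((List.range c).map (fun k => f r k)).sum)).sum := by
  induction L1 with
  | nil => simp
  | cons r rs ih =>
    simp only [List.map_cons, List.sum_cons, ← ih]
    rw [← PySem.List.sum_map_add_int]

lemma range_split (top b : Nat) (h : top ≤ b) :
    List.range b = List.range top ++ List.range' top (b - top) := by
  rw [List.range_eq_range', List.range_eq_range', show b = top + (b - top) by omega,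
    ← List.range'_append]
  simp

lemma pvPre_pvArr (m : List (List Int)) (M top b c : Nat) (hc : c ≤ M) (htb : top ≤ b) :
    pvPre (pvArr m M top b) c = pvS m b c - pvS m top c := by
  have h1 : ∀ k, k < c → (pvArr m M top b).getD k 0 =
      ((List.range' top (b - top)).map (fun r => pvEnt m r k)).sum := by
    intro k hk; exact pvArr_getD m M top b k (by omega)
  have h2 : pvPre (pvArr m M top b) c =
      ((List.range c).map (fun k => ((List.range' top (b - top)).map (fun r => pvEnt m r k)).sum)).sum := by
    unfold pvPre
    congr 1
    apply List.map_congr_left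
    intro k hk
    exact h1 k (List.mem_range.mp hk)
  rw [h2, sum_map_comm]
  have h3 : (List.range' top (b - top)).map (fun r => ((List.range c).map (fun k => pvEnt m r k)).sum) =
      (List.range' top (b - top)).map (fun r => pvRowP m r c) := rfl
  rw [h3]
  unfold pvS
  rw [range_split top b htb, List.map_append, List.sum_append]
  ring

lemma parity_beq (x y : Int) : ((y - x) % 2 == 0) = ((x % 2) == (y % 2)) := by
  rw [Bool.eq_iff_iff]
  simp only [beq_iff_eq]
  omega

-- A's per-pair even-prefix count (including the empty prefix) is pvE
lemma pvEv_pvArr (m : List (List Int)) (M top b : Nat) (htb : top ≤ b) :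
    1 + pvEv 0 (pvArr m M top b) = pvE m M top b := by
  have hlen : (pvArr m M top b).length = M := by simp [pvArr]
  rw [pvEv_countP, hlen]
  unfold pvE
  rw [List.range_succ_eq_map, List.countP_cons, List.countP_map]
  have h0 : pvS m top 0 = 0 := by simp [pvS, pvRowP]
  have h0' : pvS m b 0 = 0 := by simp [pvS, pvRowP]
  have hcong : (List.range M).countP ((fun c => pvS m top c % 2 == pvS m b c % 2) ∘ (fun n => n + 1)) =
      (List.range M).countP (fun j => (0 + pvPre (pvArr m M top b) (j + 1)) % 2 == 0) := by
    apply List.countP_congr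
    intro j hj
    have hj' : j < M := List.mem_range.mp hj
    simp only [Function.comp_apply]
    rw [pvPre_pvArr m M top b (j + 1) (by omega) htb]
    rw [show (0 : Int) + (pvS m b (j+1) - pvS m top (j+1)) = pvS m b (j+1) - pvS m top (j+1) by ring]
    rw [parity_beq]
  rw [hcong, h0, h0']
  simp
  ring

-- A's per-pair contribution: one run of the inner parity loop adds pvF
lemma pvInner_value (m : List (List Int)) (M top b : Nat) (c : Int) (htb : top ≤ b) :
    ((pvArr m M top b).foldl pvStepA (0, 1, 0, c)).2.2.2 = c + pvF m M top b := by
  rw [pvStepA_fold]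
  have hlen : (pvArr m M top b).length = M := by simp [pvArr]
  rw [hlen]
  have hE := pvEv_pvArr m M top b htb
  have hT1 : pvT 1 = 0 := by decide
  have hT0 : pvT 0 = 0 := by decide
  have h1 : (1 : Int) + pvEv 0 (pvArr m M top b) = pvE m M top b := hE
  unfold pvF
  rw [show pvT (1 + pvEv 0 (pvArr m M top b)) = pvT (pvE m M top b) by rw [← h1]]
  rw [show (0 : Int) + ((M : Int) - pvEv 0 (pvArr m M top b)) = (M + 1 : Int) - pvE m M top b by omega]
  rw [hT1, hT0]
  ring

-- ===== A characterized =====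
lemma pvA_inner (m : List (List Int)) (M : Nat) (k b0 : Nat) (c : Int) (htb : Nat) (h : htb ≤ b0) :
    (List.range' b0 k).foldl (fun (st : List Int × Int) bottom =>
        let arr := pvAddRow st.1 (m.getD bottom []) M
        let s := arr.foldl pvStepA (0, 1, 0, st.2)
        (arr, s.2.2.2)) (pvArr m M htb b0, c) =
      (pvArr m M htb (b0 + k), c + ((List.range k).map (fun j => pvF m M htb (b0 + j + 1))).sum) := by
  induction k generalizing b0 c with
  | zero => simp
  | succ k ih =>
    rw [List.range'_succ, List.foldl_cons]
    simp only
    rw [pvArr_step m M htb b0 h, pvInner_value m M htb (b0 + 1) c (by omega)]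
    rw [ih (b0 + 1) (c + pvF m M htb (b0 + 1)) (by omega)]
    simp only [Prod.mk.injEq]
    refine ⟨?_, ?_⟩
    · congr 1; omega
    · rw [List.range_succ_eq_map, List.map_cons, List.sum_cons, List.map_map]
      have : (List.range k).map ((fun j => pvF m M htb (b0 + j + 1)) ∘ (fun n => n + 1)) =
          (List.range k).map (fun j => pvF m M htb (b0 + 1 + j + 1)) := by
        apply List.map_congr_left
        intro a _
        simp only [Function.comp_apply]
        congr 1
        omega
      rw [this]
      ring

lemma pvA_eq (m : List (List Int)) :
    count_even_sum_submatrices m =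
      ((List.range m.length).map (fun top =>
        ((List.range (m.length - top)).map (fun j => pvF m (m.headI).length top (top + j + 1))).sum)).sum := by
  unfold count_even_sum_submatrices
  simp only
  have hbody : ∀ (c : Int) (top : Nat),
      ((List.range' top (m.length - top)).foldl (fun (st : List Int × Int) bottom =>
        let arr := pvAddRow st.1 (m.getD bottom []) (m.headI).length
        let s := arr.foldl pvStepA (0, 1, 0, st.2)
        (arr, s.2.2.2)) (List.replicate (m.headI).length 0, c)).2 =
      c + ((List.range (m.length - top)).map (fun j => pvF m (m.headI).length top (top + j + 1))).sum := by
    intro c top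
    rw [← pvArr_base m (m.headI).length top]
    rw [pvA_inner m (m.headI).length (m.length - top) top c top (le_refl top)]
  calc (List.range m.length).foldl (fun count top =>
      ((List.range' top (m.length - top)).foldl (fun (st : List Int × Int) bottom =>
        let arr := pvAddRow st.1 (m.getD bottom []) (m.headI).length
        let s := arr.foldl pvStepA (0, 1, 0, st.2)
        (arr, s.2.2.2)) (List.replicate (m.headI).length 0, count)).2) 0
      = (List.range m.length).foldl (fun count top =>
          count + ((List.range (m.length - top)).map (fun j => pvF m (m.headI).length top (top + j + 1))).sum) 0 := by
        apply PySem.List.foldl_congr_mem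
        intro a x _
        exact hbody a x
    _ = _ := by rw [PySem.List.foldl_add]; ring

-- ===== B characterized =====
lemma pvPar_getD (m : List (List Int)) (M i c : Nat) (hc : c ≤ M) :
    (pvPar m M i).getD c 0 = pvS m i c % 2 := by
  unfold pvPar
  exact PySem.List.getD_map_range _ _ _ _ (by omega : c < M + 1)

lemma pvRowP_succ (m : List (List Int)) (r c : Nat) :
    pvRowP m r (c + 1) = pvRowP m r c + pvEnt m r c := by
  simp [pvRowP, List.range_succ]

lemma pvS_succ (m : List (List Int)) (i c : Nat) :
    pvS m (i + 1) c = pvS m i c + pvRowP m i c := by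
  simp [pvS, List.range_succ]

lemma pvNextRow_inner (m : List (List Int)) (M i : Nat) (K : Nat) (hK : K ≤ M) :
    (List.range K).foldl (fun (st : Int × List Int) c =>
        let p := (st.1 + (m.getD i []).getD c 0) % 2
        (p, st.2 ++ [((pvPar m M i).getD (c + 1) 0 + p) % 2])) (0, [(pvPar m M i).getD 0 0]) =
      (pvRowP m i K % 2, (List.range (K + 1)).map (fun c => pvS m (i + 1) c % 2)) := by
  induction K with
  | zero =>
    simp only [List.range_zero, List.foldl_nil]
    simp only [Prod.mk.injEq]
    refine ⟨?_, ?_⟩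
    · simp [pvRowP]
    · rw [pvPar_getD m M i 0 (by omega)]
      simp [pvS, pvRowP]
  | succ K ih =>
    have hK' : K ≤ M := by omega
    rw [List.range_succ, List.foldl_append, ih hK', List.foldl_cons, List.foldl_nil]
    simp only
    have hent : (m.getD i []).getD K 0 = pvEnt m i K := rfl
    have hp : (pvRowP m i K % 2 + (m.getD i []).getD K 0) % 2 = pvRowP m i (K + 1) % 2 := by
      rw [hent, pvRowP_succ]
      omega
    simp only [Prod.mk.injEq]
    refine ⟨?_, ?_⟩
    · exact hp
    · rw [hp, pvPar_getD m M i (K + 1) (by omega)]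
      have hval : (pvS m i (K + 1) % 2 + pvRowP m i (K + 1) % 2) % 2 = pvS m (i + 1) (K + 1) % 2 := by
        rw [pvS_succ]
        omega
      rw [hval]
      rw [show K + 1 + 1 = (K + 1) + 1 from rfl, List.range_succ (n := K + 1), List.map_append]
      simp

lemma pvPar_zero (m : List (List Int)) (M : Nat) :
    pvPar m M 0 = List.replicate (M + 1) 0 := by
  unfold pvPar
  have : ∀ c ∈ List.range (M + 1), pvS m 0 c % 2 = (0 : Int) := by
    intro c _; simp [pvS, pvRowP]
  rw [List.map_congr_left this, List.map_const']
  simp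

lemma pvNextRow_par (m : List (List Int)) (M i : Nat) :
    pvNextRow (pvPar m M i) (m.getD i []) M = pvPar m M (i + 1) := by
  unfold pvNextRow
  rw [pvNextRow_inner m M i M (le_refl M)]
  simp [pvPar]

lemma pvVpref_fold (m : List (List Int)) (M : Nat) :
    ∀ (rs : List (List Int)) (i : Nat) (acc : List (List Int)), m.drop i = rs →
    rs.foldl (fun (st : List Int × List (List Int)) row =>
        let nxt := pvNextRow st.1 row M
        (nxt, st.2 ++ [nxt])) (pvPar m M i, acc) =
      (pvPar m M (i + rs.length), acc ++ (List.range' (i + 1) rs.length).map (pvPar m M)) := by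
  intro rs
  induction rs with
  | nil => intro i acc _; simp
  | cons r rs ih =>
    intro i acc hdrop
    have hi : i < m.length := by
      by_contra hc
      rw [List.drop_eq_nil_of_le (by omega)] at hdrop
      exact absurd hdrop.symm (List.cons_ne_nil r rs)
    have hr : m.getD i [] = r := by
      have h1 : m[i]? = some r := by
        rw [← Nat.add_zero i, ← List.getElem?_drop, hdrop]
        rfl
      simp [List.getD, h1]
    have hdrop' : m.drop (i + 1) = rs := by
      have h2 := congrArg (List.drop 1) hdrop
      rw [List.drop_drop] at h2
      simpa using h2
    rw [List.foldl_cons]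
    simp only
    rw [← hr, pvNextRow_par m M i]
    rw [ih (i + 1) (acc ++ [pvPar m M (i + 1)]) hdrop']
    simp only [Prod.mk.injEq]
    refine ⟨?_, ?_⟩
    · simp only [List.length_cons]
      congr 1
      omega
    · simp only [List.length_cons, List.append_assoc]
      congr 1

lemma pvVpref_eq (m : List (List Int)) (M : Nat) :
    (m.foldl (fun (st : List Int × List (List Int)) row =>
        let nxt := pvNextRow st.1 row M
        (nxt, st.2 ++ [nxt])) (List.replicate (M + 1) 0, [List.replicate (M + 1) 0])).2 =
      (List.range (m.length + 1)).map (pvPar m M) := by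
  rw [← pvPar_zero m M]
  have h := pvVpref_fold m M m 0 [pvPar m M 0] (by simp)
  rw [show ([pvPar m M 0] : List (List Int)) = [pvPar m M 0] from rfl] at h
  rw [h]
  simp only
  rw [List.range_eq_range', show m.length + 1 = 1 + m.length by omega]
  rw [← List.range'_append (step := 1) (s := 0) (m := 1) (n := m.length)]
  rw [List.map_append]
  simp [List.range'_one]

lemma pvPairCount (m : List (List Int)) (M top b : Nat) :
    ((((pvPar m M top).zip (pvPar m M b)).filter (fun ab => ab.1 == ab.2)).length : Int) = pvE m M top b := by
  unfold pvPar
  rw [List.zip_map']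
  rw [← List.countP_eq_length_filter]
  rw [List.countP_map]
  rfl

lemma pvB_eq (m : List (List Int)) :
    count_even_sum_submatrices_alt m =
      ((List.range m.length).map (fun top =>
        ((List.range (m.length - top)).map (fun j => pvF m (m.headI).length top (top + j + 1))).sum)).sum := by
  unfold count_even_sum_submatrices_alt
  simp only
  rw [pvVpref_eq m (m.headI).length]
  have hgetD : ∀ i : Nat, i ≤ m.length →
      ((List.range (m.length + 1)).map (pvPar m (m.headI).length)).getD i [] = pvPar m (m.headI).length i := by
    intro i hi
    exact PySem.List.getD_map_range _ _ _ _ (by omega)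
  have hbody : ∀ (c : Int) (top : Nat), top < m.length →
      (List.range' (top + 1) (m.length - top)).foldl (fun ans bottom =>
        let u := ((List.range (m.length + 1)).map (pvPar m (m.headI).length)).getD top []
        let v := ((List.range (m.length + 1)).map (pvPar m (m.headI).length)).getD bottom []
        let e : Int := (((u.zip v).filter (fun ab => ab.1 == ab.2)).length : Int)
        let o : Int := ((m.headI).length + 1 : Int) - e
        ans + PySem.Int.floordiv (e * (e - 1)) 2 + PySem.Int.floordiv (o * (o - 1)) 2) c =
      c + ((List.range (m.length - top)).map (fun j => pvF m (m.headI).length top (top + j + 1))).sum := by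
    intro c top htop
    have hshape : (List.range' (top + 1) (m.length - top)).foldl (fun ans bottom =>
        let u := ((List.range (m.length + 1)).map (pvPar m (m.headI).length)).getD top []
        let v := ((List.range (m.length + 1)).map (pvPar m (m.headI).length)).getD bottom []
        let e : Int := (((u.zip v).filter (fun ab => ab.1 == ab.2)).length : Int)
        let o : Int := ((m.headI).length + 1 : Int) - e
        ans + PySem.Int.floordiv (e * (e - 1)) 2 + PySem.Int.floordiv (o * (o - 1)) 2) c =
        (List.range' (top + 1) (m.length - top)).foldl (fun ans bottom => ans + pvF m (m.headI).length top bottom) c := by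
      apply PySem.List.foldl_congr_mem
      intro a bottom hmem
      have hb : top + 1 ≤ bottom ∧ bottom < top + 1 + (m.length - top) := by
        have := List.mem_range'.mp hmem
        obtain ⟨i, hi1, hi2⟩ := this
        omega
      simp only
      rw [hgetD top (by omega), hgetD bottom (by omega)]
      rw [pvPairCount m (m.headI).length top bottom]
      unfold pvF pvT
      ring_nf
    rw [hshape, PySem.List.foldl_add]
    congr 1
    rw [List.range'_eq_map_range, List.map_map]
    congr 1
    apply List.map_congr_left
    intro j _
    simp only [Function.comp_apply]
    congr 1
    omega
  calc (List.range m.length).foldl (fun ans top =>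
      (List.range' (top + 1) (m.length - top)).foldl (fun ans bottom =>
        let u := ((List.range (m.length + 1)).map (pvPar m (m.headI).length)).getD top []
        let v := ((List.range (m.length + 1)).map (pvPar m (m.headI).length)).getD bottom []
        let e : Int := (((u.zip v).filter (fun ab => ab.1 == ab.2)).length : Int)
        let o : Int := ((m.headI).length + 1 : Int) - e
        ans + PySem.Int.floordiv (e * (e - 1)) 2 + PySem.Int.floordiv (o * (o - 1)) 2) ans) 0
      = (List.range m.length).foldl (fun ans top =>
          ans + ((List.range (m.length - top)).map (fun j => pvF m (m.headI).length top (top + j + 1))).sum) 0 := by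
        apply PySem.List.foldl_congr_mem
        intro a top hmem
        exact hbody a top (List.mem_range.mp hmem)
    _ = _ := by rw [PySem.List.foldl_add]; ring

lemma pvTotal_eq (m : List (List Int)) :
    count_even_sum_submatrices m = count_even_sum_submatrices_alt m := by
  rw [pvA_eq, pvB_eq]

-- ===== VERDICT (by name: the statement is the Claim_ definition above) =====
theorem count_even_sum_submatrices_spec : Claim_equal_count_even_sum_submatrices := by
  intro matrix _ _
  unfold Spec_count_even_sum_submatrices
  exact pvTotal_eq matrix
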